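-- pv_equiv track=rewrite | github.com/aryanf/WindowsRunTool | python/run.py | find_and_remove_first_int
-- ===== SOURCE A (Python) =====
-- def is_int(s):
--     try:
--         int(s)
--         return True
--     except ValueError:
--         return False
--
-- def find_and_remove_first_int(input_list):
--     found_int = None
--     new_list = []
--     for item in input_list:
--         if is_int(item) and found_int is None:
--             found_int = item
--         else:
--             new_list.append(item)
--     if found_int is not None:
--         return found_int, new_list
--     else:
--         return 0, input_list
-- ===== SOURCE B (Python) =====
-- def is_int(s):
--     try:
--         int(s)
--         return True
--     except ValueError:
--         return False
--
-- def find_and_remove_first_int(input_list):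
--     for i, item in enumerate(input_list):
--         if is_int(item):
--             return item, list(input_list[:i]) + list(input_list[i+1:])
--     return 0, input_list
-- ===== Notes on version B (the rewrite author's own statement) =====
-- stated objective: simpler
-- what changed: Replaces A's single accumulator pass (which keeps appending every remaining item to a new list after the hit) with an enumerate/early-return scan that stops at the first int-parseable item and rebuilds the result by slicing around its index.
-- outside the precondition, e.g. on find_and_remove_first_int(['a', 'b']): A returns (0, ['a', 'b']), B returns (0, ['a', 'b'])
import Mathlib
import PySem

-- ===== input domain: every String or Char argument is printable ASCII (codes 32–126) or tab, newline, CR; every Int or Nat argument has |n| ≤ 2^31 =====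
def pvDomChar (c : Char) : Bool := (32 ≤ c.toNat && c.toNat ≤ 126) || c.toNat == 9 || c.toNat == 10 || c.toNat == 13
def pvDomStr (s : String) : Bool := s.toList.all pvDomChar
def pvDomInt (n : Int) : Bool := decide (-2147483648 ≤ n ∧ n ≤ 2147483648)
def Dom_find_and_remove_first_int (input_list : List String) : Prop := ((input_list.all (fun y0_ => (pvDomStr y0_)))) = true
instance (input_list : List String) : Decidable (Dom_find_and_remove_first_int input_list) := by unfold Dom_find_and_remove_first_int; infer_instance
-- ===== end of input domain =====

-- B replaces A's accumulator pass with an enumerate/early-return scan plus slicing: simpler decomposition, same O(n) cost.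


-- ===== PORT A =====
-- is_int(s): int(s) succeeds (ValueError → False); shared verbatim by both Python versions
def is_int (s : String) : Bool := (PySem.Int.ofStr? s).isSome

-- A's loop: state (found_int, new_list), same branch order as the Python for-loop
def pvALoop : List String → Option String → List String → Option String × List String
  | [], found_int, new_list => (found_int, new_list)
  | item :: rest, found_int, new_list =>
      if is_int item ∧ found_int = none then
        pvALoop rest (some item) new_list
      else
        pvALoop rest found_int (new_list ++ [item])

def find_and_remove_first_int (input_list : List String) : String × List String :=
  match pvALoop input_list none [] with
  | (some found_int, new_list) => (found_int, new_list)
  -- Python returns the int 0 here (not a str); outside Pre_, nothing claimed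
  | (none, _) => ("0", input_list)

-- ===== PORT B =====
-- B's loop: enumerate with early return; input_list[:i] / input_list[i+1:] are List.take i / List.drop (i+1)
-- (exact for a nonnegative in-range index i, which the enumeration guarantees)
def pvBLoop (full : List String) : List String → Nat → String × List String
  | [], _ => ("0", full)      -- Python returns the int 0 here; outside Pre_, nothing claimed
  | item :: rest, i =>
      if is_int item then (item, full.take i ++ full.drop (i + 1))
      else pvBLoop full rest (i + 1)

def find_and_remove_first_int_alt (input_list : List String) : String × List String :=
  pvBLoop input_list input_list 0

-- ===== PRECONDITION & SPEC =====
-- Pre_ excludes inputs with no int-parseable item: there Python A (and B) return the int 0 as first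
-- component, which is not a value of the declared str type.
def Pre_find_and_remove_first_int (input_list : List String) : Prop :=
  (input_list.any is_int) = true
instance (input_list : List String) : Decidable (Pre_find_and_remove_first_int input_list) := by
  unfold Pre_find_and_remove_first_int; infer_instance

def pvWitness_find_and_remove_first_int : List String := ["a", "7", "b"]

def Spec_find_and_remove_first_int (input_list : List String) (out : String × List String) : Prop := out = find_and_remove_first_int_alt input_list
instance (input_list : List String) (out : String × List String) : Decidable (Spec_find_and_remove_first_int input_list out) := by unfold Spec_find_and_remove_first_int; infer_instance

-- ===== CLAIM (what is proved, stated in full; the proofs are below) =====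
def Claim_equal_find_and_remove_first_int : Prop := ∀ (input_list : List String), Dom_find_and_remove_first_int input_list → Pre_find_and_remove_first_int input_list → Spec_find_and_remove_first_int input_list (find_and_remove_first_int input_list)

-- ===== LEMMAS AND PROOFS =====

-- once found_int is set, A's loop just appends everything remaining
theorem pvALoop_some (xs : List String) (f : String) :
    ∀ nl, pvALoop xs (some f) nl = (some f, nl ++ xs) := by
  induction xs with
  | nil => intro nl; simp [pvALoop]
  | cons x rest ih => intro nl; simp [pvALoop, ih]

-- main invariant: at index i with prefix nl consumed, the two loops agree
theorem pvLoop_eq (rest : List String) : ∀ (full : List String) (i : Nat) (nl : List String),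
    full.take i = nl → full.drop i = rest → rest.any is_int = true →
    (match pvALoop rest none nl with
     | (some found_int, new_list) => (found_int, new_list)
     | (none, _) => ("0", full)) = pvBLoop full rest i := by
  induction rest with
  | nil => intro full i nl _ _ hpre; simp at hpre
  | cons x rest' ih =>
    intro full i nl htake hdrop hpre
    by_cases hx : is_int x = true
    · have hdrop' : full.drop (i + 1) = rest' := by
        have := congrArg List.tail hdrop
        simpa [List.tail_drop] using this
      simp [pvALoop, pvBLoop, hx, pvALoop_some, htake, hdrop']
    · have hget : full[i]? = some x := by
        have := congrArg List.head? hdrop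
        simpa [List.head?_drop] using this
      have htake' : full.take (i + 1) = nl ++ [x] := by
        rw [List.take_add_one, hget, ← htake]; rfl
      have hdrop' : full.drop (i + 1) = rest' := by
        have := congrArg List.tail hdrop
        simpa [List.tail_drop] using this
      have hpre' : rest'.any is_int = true := by
        simp [hx] at hpre; simpa using hpre
      simp only [pvALoop, pvBLoop, hx, false_and, if_false, Bool.false_eq_true]
      exact ih full (i + 1) (nl ++ [x]) htake' hdrop' hpre'

-- ===== VERDICT (by name: the statement is the Claim_ definition above) =====
theorem find_and_remove_first_int_spec : Claim_equal_find_and_remove_first_int := by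
  intro input_list _ hpre
  unfold Spec_find_and_remove_first_int find_and_remove_first_int find_and_remove_first_int_alt
  exact pvLoop_eq input_list input_list 0 [] (by simp) (by simp) hpre
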